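-- pv_equiv track=rewrite | github.com/Feathergunner/DebruijnGraphBuilder | new_stat_test.py | compute_n
-- ===== SOURCE A (Python) =====
-- def compute_n(r, k, i):
-- 	# brute-force-check
-- 	n = 0
-- 	max_number_reached = False
-- 	a = [0]*r
-- 	#print a
-- 	while not max_number_reached:
-- 		if sum(a) == k:
-- 			number_valid = True
-- 			num_ajd_ones = 0
-- 			for j in a:
-- 				if j == 0:
-- 					num_ajd_ones = 0
-- 				else:
-- 					num_ajd_ones += 1
-- 					if num_ajd_ones >= i:
-- 						number_valid = False
-- 			if number_valid:
-- 				#print a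
-- 				n += 1
-- 		# increase a
-- 		j = 0
-- 		while j < r and a[j] == 1:
-- 			a[j] = 0
-- 			j+=1
-- 		if j < r:
-- 			a[j] = 1
-- 		else:
-- 			max_number_reached = True
-- 	return n
-- ===== SOURCE B (Python) =====
-- def compute_n(r, k, i):
-- 	# Dynamic programming over (ones used, current run of ones) per position,
-- 	# instead of enumerating all 2^r bit strings.
-- 	rr = r if r > 0 else 0
-- 	if k < 0 or k > rr:
-- 		return 0
-- 	U = i if i < rr + 1 else rr + 1
-- 	if U < 1:
-- 		U = 1
-- 	zero = [0] * U
-- 	dp = [[1] + zero[1:]] + [zero[:] for _ in range(k)]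
-- 	for _ in range(rr):
-- 		ndp = []
-- 		prev = zero
-- 		for row in dp:
-- 			ndp.append(([sum(row)] + prev)[:U])
-- 			prev = row
-- 		dp = ndp
-- 	return sum(dp[-1])
-- ===== Notes on version B (the rewrite author's own statement) =====
-- stated objective: faster
-- what changed: Replaced the brute-force enumeration of all 2^r bit strings (per-string sum and run scan) by a dynamic program over (position, ones used, current run length) propagated through a (k+1) x min(i,r+1) table; intended as faster (asymptotic) -- a timing run could not take a clean ratio because A already times out at r=16 where B returns instantly.
import Mathlib
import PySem

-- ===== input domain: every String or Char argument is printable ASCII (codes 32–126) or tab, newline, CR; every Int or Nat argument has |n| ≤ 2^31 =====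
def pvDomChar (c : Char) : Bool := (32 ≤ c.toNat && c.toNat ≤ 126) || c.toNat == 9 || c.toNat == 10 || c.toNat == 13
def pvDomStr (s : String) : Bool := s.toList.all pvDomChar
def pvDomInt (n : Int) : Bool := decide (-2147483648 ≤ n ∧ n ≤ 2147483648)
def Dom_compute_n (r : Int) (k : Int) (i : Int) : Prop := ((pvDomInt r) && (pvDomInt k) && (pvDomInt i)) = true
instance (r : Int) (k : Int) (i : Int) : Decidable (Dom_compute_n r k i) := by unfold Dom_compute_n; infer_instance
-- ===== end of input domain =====

-- B replaces A's brute-force enumeration of all 2^r bit strings by a dynamic program over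
-- (ones used, current run of ones); intended as faster (a timing run saw A time out at
-- r=16 where B returned; no clean ratio could be measured at a size both finish).


-- ===== PORT A =====
-- the inner 'for j in a' run-length/validity scan, as a foldl over (valid, num_adj_ones)
def checkStep (i : Int) (st : Bool × Int) (j : Int) : Bool × Int :=
  if j == 0 then (st.1, 0)
  else
    let run := st.2 + 1
    (if run ≥ i then false else st.1, run)

def checkA (i : Int) (a : List Int) : Bool × Int := a.foldl (checkStep i) (true, 0)

-- the inner 'while j < r and a[j] == 1' increment scan (head of the list = a[0]);
-- second component true = 'max_number_reached'
def incA : List Int → List Int × Bool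
  | [] => ([], true)
  | x :: t =>
    if x == 1 then
      match incA t with
      | (t', ov) => (0 :: t', ov)
    else (1 :: t, false)

-- the outer 'while not max_number_reached' loop; fuel 2^r is enough since the loop
-- steps through the binary counter values 0 .. 2^r - 1 exactly once
def loopA (k i : Int) : Nat → List Int → Int → Int
  | 0, _, n => n
  | f + 1, a, n =>
    let n' := if a.sum == k && (checkA i a).1 then n + 1 else n
    match incA a with
    | (_, true) => n'
    | (a', false) => loopA k i f a' n'

def compute_n (r : Int) (k : Int) (i : Int) : Int :=
  loopA k i (2 ^ r.toNat) (List.replicate r.toNat 0) 0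

-- ===== PORT B =====
-- DP over positions: dp[o][u] = number of admissible strings so far with o ones and a
-- current trailing run of u ones; each new row is [sum of old row] ++ previous old row
def compute_n_alt (r : Int) (k : Int) (i : Int) : Int :=
  let rr := if r > 0 then r else 0
  if k < 0 || k > rr then 0
  else
    let U0 := if i < rr + 1 then i else rr + 1
    let U := if U0 < 1 then 1 else U0
    let zero : List Int := List.replicate U.toNat 0
    let dp0 : List (List Int) := (1 :: zero.drop 1) :: List.replicate k.toNat zero
    let dp := (List.range rr.toNat).foldl (fun dp _ =>
      (dp.foldl (fun (st : List (List Int) × List Int) row =>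
          (st.1 ++ [(row.sum :: st.2).take U.toNat], row)) ([], zero)).1) dp0
    ((PySem.List.pyGet? dp (-1)).getD []).sum

-- ===== PRECONDITION & SPEC =====
def Spec_compute_n (r : Int) (k : Int) (i : Int) (out : Int) : Prop := out = compute_n_alt r k i
instance (r : Int) (k : Int) (i : Int) (out : Int) : Decidable (Spec_compute_n r k i out) := by unfold Spec_compute_n; infer_instance

-- ===== CLAIM (what is proved, stated in full; the proofs are below) =====
def Claim_equal_compute_n : Prop := ∀ (r : Int) (k : Int) (i : Int), Dom_compute_n r k i → Spec_compute_n r k i (compute_n r k i)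

-- ===== LEMMAS AND PROOFS =====

def enum : Nat → List (List Int)
  | 0 => [[]]
  | m + 1 => (enum m).map (· ++ [0]) ++ (enum m).map (· ++ [1])

def goVis : Nat → List Int → List (List Int)
  | 0, a => [a]
  | f + 1, a =>
    match incA a with
    | (_, true) => [a]
    | (a', false) => a :: goVis f a'

def valA (a : List Int) : Nat := a.foldr (fun b acc => b.toNat + 2 * acc) 0

def binaryL (a : List Int) : Prop := ∀ x ∈ a, x = 0 ∨ x = 1

theorem incA_append (a : List Int) (x : Int) :
    incA (a ++ [x]) =
      match incA a with
      | (a', true) => if x == 1 then (a' ++ [0], true) else (a' ++ [1], false)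
      | (a', false) => (a' ++ [x], false) := by
  induction a with
  | nil =>
    by_cases hx : x = 1 <;> simp [incA, hx]
  | cons y t ih =>
    by_cases hy : y = 1
    · simp only [List.cons_append, incA, hy]
      rcases h : incA t with ⟨t', ov⟩
      cases ov <;> simp [h] at ih ⊢ <;> simp [ih] <;> by_cases hx : x = 1 <;> simp [hx]
    · simp [incA, hy]
theorem valA_cons (x : Int) (t : List Int) : valA (x :: t) = x.toNat + 2 * valA t := rfl

theorem incA_true_fst (a : List Int) (hov : (incA a).2 = true) :
    (incA a).1 = List.replicate a.length 0 := by
  induction a with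
  | nil => simp [incA]
  | cons y t ih =>
    by_cases hy : y = 1
    · rcases h : incA t with ⟨t', ov⟩
      simp [incA, hy, h] at hov ⊢
      subst hov
      have := ih (by simp [h])
      simp [h] at this
      simp [List.replicate_succ, this]
    · simp [incA, hy] at hov
theorem incA_true_val (a : List Int) (h : binaryL a) (hov : (incA a).2 = true) :
    valA a = 2 ^ a.length - 1 := by
  induction a with
  | nil => simp [valA]
  | cons y t ih =>
    by_cases hy : y = 1
    · rcases hi : incA t with ⟨t', ov⟩
      simp [incA, hy, hi] at hov
      subst hov
      have hb : binaryL t := fun x hx => h x (List.mem_cons_of_mem _ hx)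
      have := ih hb (by simp [hi])
      have h2 : 1 ≤ 2 ^ t.length := Nat.one_le_two_pow
      simp [valA_cons, hy, this, List.length_cons, pow_succ]
      omega
    · have := h y (List.mem_cons_self)
      simp [incA, hy] at hov
theorem valA_le (a : List Int) (h : binaryL a) : valA a ≤ 2 ^ a.length - 1 := by
  induction a with
  | nil => simp [valA]
  | cons y t ih =>
    have hb : binaryL t := fun x hx => h x (List.mem_cons_of_mem _ hx)
    have := ih hb
    have h2 : 1 ≤ 2 ^ t.length := Nat.one_le_two_pow
    rcases h y (List.mem_cons_self) with hy | hy <;>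
      simp [valA_cons, hy, List.length_cons, pow_succ] <;> omega

theorem incA_false (a : List Int) (h : binaryL a) (hov : (incA a).2 = false) :
    valA (incA a).1 = valA a + 1 ∧ binaryL (incA a).1 ∧ (incA a).1.length = a.length := by
  induction a with
  | nil => simp [incA] at hov
  | cons y t ih =>
    by_cases hy : y = 1
    · rcases hi : incA t with ⟨t', ov⟩
      simp [incA, hy, hi] at hov ⊢
      subst hov
      have hb : binaryL t := fun x hx => h x (List.mem_cons_of_mem _ hx)
      have := ih hb
      simp [hi] at this
      refine ⟨?_, ?_, ?_⟩
      · simp [valA_cons, this.1]; omega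
      · intro x hx
        rcases List.mem_cons.mp hx with hx' | hx'
        · left; exact hx'
        · exact this.2.1 x hx'
      · simp [this.2.2]
    · simp [incA, hy, valA_cons]
      rcases h y (List.mem_cons_self) with h0 | h0
      · refine ⟨by simp [h0]; ring, ?_⟩
        intro x hx
        rcases List.mem_cons.mp hx with hx' | hx'
        · right; exact hx'
        · exact h x (List.mem_cons_of_mem _ hx')
      · exact absurd h0 hy
theorem loopA_succ (k i : Int) (f : Nat) (a : List Int) (n : Int) :
    loopA k i (f + 1) a n =
      (if (incA a).2 then (if a.sum == k && (checkA i a).1 then n + 1 else n)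
       else loopA k i f (incA a).1 (if a.sum == k && (checkA i a).1 then n + 1 else n)) := by
  rcases h : incA a with ⟨a', ov⟩
  cases ov <;> simp [loopA, h]

theorem goVis_succ (f : Nat) (a : List Int) :
    goVis (f + 1) a = (if (incA a).2 then [a] else a :: goVis f (incA a).1) := by
  rcases h : incA a with ⟨a', ov⟩
  cases ov <;> simp [goVis, h]

theorem loopA_count (k i : Int) :
    ∀ (f : Nat) (a : List Int) (n : Int),
      loopA k i (f + 1) a n =
        n + ((goVis f a).countP (fun b => b.sum == k && (checkA i b).1) : Int) := by
  intro f
  induction f with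
  | zero =>
    intro a n
    rcases h : incA a with ⟨a', ov⟩
    rw [loopA_succ]
    cases ov
    · simp [loopA, goVis, h, List.countP_cons]
      split <;> simp
    · simp [loopA, goVis, h, List.countP_cons]
      split <;> simp
  | succ f ih =>
    intro a n
    rw [loopA_succ]
    rcases h : incA a with ⟨a', ov⟩
    cases ov
    · simp only [h, if_false]
      rw [ih, goVis_succ]
      simp [h, List.countP_cons]
      split <;> omega
    · simp only [h, if_true]
      rw [goVis_succ]
      simp [h, List.countP_cons]
      split <;> simp

theorem incA_app_one_false (a a' : List Int) (h : incA a = (a', false)) :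
    incA (a ++ [1]) = (a' ++ [1], false) := by
  have := incA_append a 1; rw [h] at this; exact this

theorem incA_app_one_true (a a' : List Int) (h : incA a = (a', true)) :
    incA (a ++ [1]) = (a' ++ [0], true) := by
  have := incA_append a 1; rw [h] at this; exact this

theorem incA_app_zero_false (a a' : List Int) (h : incA a = (a', false)) :
    incA (a ++ [0]) = (a' ++ [0], false) := by
  have := incA_append a 0; rw [h] at this; exact this

theorem incA_app_zero_true (a a' : List Int) (h : incA a = (a', true)) :
    incA (a ++ [0]) = (a' ++ [1], false) := by
  have := incA_append a 0; rw [h] at this; exact this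

theorem goVis_append_one (f : Nat) (a : List Int) :
    goVis f (a ++ [1]) = (goVis f a).map (· ++ [1]) := by
  induction f generalizing a with
  | zero => simp [goVis]
  | succ f ih =>
    rcases h : incA a with ⟨a', ov⟩
    cases ov
    · simp [goVis, h, incA_app_one_false a a' h, ih]
    · simp [goVis, h, incA_app_one_true a a' h]
theorem incA_true_of_max (a : List Int) (h : binaryL a) (hv : valA a = 2 ^ a.length - 1) :
    (incA a).2 = true := by
  by_contra hov
  have hov' : (incA a).2 = false := by simpa using hov
  obtain ⟨h1, h2, h3⟩ := incA_false a h hov'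
  have := valA_le (incA a).1 h2
  rw [h3] at this
  have h2p : 1 ≤ 2 ^ a.length := Nat.one_le_two_pow
  omega

theorem binaryL_replicate (m : Nat) : binaryL (List.replicate m 0) := by
  intro x hx
  left
  exact (List.eq_of_mem_replicate hx)

theorem valA_replicate (m : Nat) : valA (List.replicate m 0) = 0 := by
  induction m with
  | zero => rfl
  | succ m ih => simp [List.replicate_succ, valA_cons, ih]

theorem goVis_append_zero (m : Nat) :
    ∀ (s : Nat) (a : List Int), binaryL a → a.length = m → s + valA a = 2 ^ m - 1 →
      goVis (s + 2 ^ m) (a ++ [0]) =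
        (goVis s a).map (· ++ [0]) ++
          (goVis (2 ^ m - 1) (List.replicate m 0)).map (· ++ [1]) := by
  intro s
  induction s with
  | zero =>
    intro a hb hl hv
    subst hl
    have hov : (incA a).2 = true := incA_true_of_max a hb (by omega)
    rcases hh : incA a with ⟨a', ov⟩
    rw [hh] at hov; subst hov
    have hz : a' = List.replicate a.length 0 := by
      have := incA_true_fst a (by rw [hh])
      rw [hh] at this; simpa using this
    have h2p : 1 ≤ 2 ^ a.length := Nat.one_le_two_pow
    obtain ⟨t, ht⟩ : ∃ t, 2 ^ a.length = t + 1 := ⟨2 ^ a.length - 1, by omega⟩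
    rw [Nat.zero_add, ht, goVis_succ, incA_app_zero_true a a' hh]
    simp only [goVis]
    rw [goVis_append_one, hz]
    have : t = 2 ^ a.length - 1 := by omega
    rw [this]
    simp
  | succ s ih =>
    intro a hb hl hv
    subst hl
    have hne : valA a ≠ 2 ^ a.length - 1 := by omega
    have hov : (incA a).2 = false := by
      by_contra hc
      exact hne (incA_true_val a hb (by simpa using hc))
    obtain ⟨hv', hb', hl'⟩ := incA_false a hb hov
    rcases hh : incA a with ⟨a', ov⟩
    rw [hh] at hov hv' hb' hl'
    subst hov
    simp only at hv' hb' hl'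
    have step : s + 1 + 2 ^ a.length = (s + 2 ^ a.length) + 1 := by omega
    rw [step, goVis_succ, incA_app_zero_false a a' hh]
    simp only [Bool.false_eq_true, if_false]
    rw [ih a' hb' (by omega) (by omega)]
    rw [goVis_succ, hh]
    simp
theorem goVis_zeros (m : Nat) :
    goVis (2 ^ m - 1) (List.replicate m 0) = enum m := by
  induction m with
  | zero => simp [goVis, enum]
  | succ m ih =>
    have h2p : 1 ≤ 2 ^ m := Nat.one_le_two_pow
    have hrep : List.replicate (m + 1) (0 : Int) = List.replicate m 0 ++ [0] := by
      rw [← List.replicate_succ']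
    have hfuel : 2 ^ (m + 1) - 1 = (2 ^ m - 1) + 2 ^ m := by
      rw [pow_succ]; omega
    rw [hrep, hfuel,
      goVis_append_zero m (2 ^ m - 1) (List.replicate m 0) (binaryL_replicate m)
        (by simp) (by rw [valA_replicate]; omega),
      ih]
    simp [enum]

theorem compute_n_eq_countP (r k i : Int) :
    compute_n r k i =
      ((enum r.toNat).countP (fun b => b.sum == k && (checkA i b).1) : Int) := by
  unfold compute_n
  have h2p : 1 ≤ 2 ^ r.toNat := Nat.one_le_two_pow
  have hfuel : 2 ^ r.toNat = (2 ^ r.toNat - 1) + 1 := by omega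
  rw [hfuel, loopA_count, goVis_zeros]
  simp
theorem checkA_append (i : Int) (b : List Int) (x : Int) :
    checkA i (b ++ [x]) = checkStep i (checkA i b) x := by
  simp [checkA, List.foldl_append]

theorem checkA_run_bounds (i : Int) :
    ∀ (b : List Int) (st : Bool × Int), 0 ≤ st.2 →
      0 ≤ (b.foldl (checkStep i) st).2 ∧ (b.foldl (checkStep i) st).2 ≤ st.2 + b.length := by
  intro b
  induction b with
  | nil => intro st h; simpa using h
  | cons x t ih =>
    intro st h
    simp only [List.foldl_cons]
    by_cases hx : x = 0
    · have := ih (st.1, 0) (by simp)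
      simp [checkStep, hx] at this ⊢
      omega
    · have := ih (if st.2 + 1 ≥ i then false else st.1, st.2 + 1) (by simp; omega)
      simp [checkStep, hx] at this ⊢
      omega

theorem checkA_valid_run (i : Int) :
    ∀ (b : List Int) (st : Bool × Int), (st.1 = true → st.2 = 0 ∨ st.2 < i) →
      (b.foldl (checkStep i) st).1 = true →
      (b.foldl (checkStep i) st).2 = 0 ∨ (b.foldl (checkStep i) st).2 < i := by
  intro b
  induction b with
  | nil => intro st h; exact h
  | cons x t ih =>
    intro st h
    simp only [List.foldl_cons]
    by_cases hx : x = 0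
    · simp only [checkStep, hx]
      exact ih (st.1, 0) (by simp)
    · have hxx : (x == 0) = false := by simpa using hx
      simp only [checkStep, hxx, Bool.false_eq_true, if_false]
      refine ih _ ?_
      intro hv
      simp only
      by_cases hlt : st.2 + 1 ≥ i
      · simp only [if_pos hlt] at hv
        exact absurd hv (by simp)
      · right; omega

theorem enum_mem (t : Nat) :
    ∀ b ∈ enum t, b.length = t ∧ binaryL b ∧ 0 ≤ b.sum ∧ b.sum ≤ (t : Int) := by
  induction t with
  | zero =>
    intro b hb
    simp [enum] at hb
    subst hb
    simp [binaryL]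
  | succ t ih =>
    intro b hb
    simp only [enum, List.mem_append, List.mem_map] at hb
    rcases hb with ⟨c, hc, rfl⟩ | ⟨c, hc, rfl⟩ <;> obtain ⟨h1, h2, h3, h4⟩ := ih c hc
    · refine ⟨by simp [h1], ?_, by simp; omega, by simp; push_cast; omega⟩
      intro x hx
      rcases List.mem_append.mp hx with hx' | hx'
      · exact h2 x hx'
      · left; simpa using hx'
    · refine ⟨by simp [h1], ?_, by simp; omega, by simp; push_cast; omega⟩
      intro x hx
      rcases List.mem_append.mp hx with hx' | hx'
      · exact h2 x hx'
      · right; simpa using hx'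
def cntN (i : Int) (t : Nat) (o u : Int) : Nat :=
  (enum t).countP (fun b => decide (b.sum = o) && decide (checkA i b = (true, u)))

theorem sum_map_natCast (l : List Nat) (f : Nat → Nat) :
    ((l.map (fun x => ((f x : Nat) : Int))).sum) = (((l.map f).sum : Nat) : Int) := by
  induction l with
  | nil => simp
  | cons x t ih => rw [List.map_cons, List.map_cons, List.sum_cons, List.sum_cons]; push_cast [ih]; ring

theorem sum_range_indicator (run : Nat) :
    ∀ U, ((List.range U).map (fun (u : Nat) => if (u:Int) = (run:Int) then (1:Nat) else 0)).sum
      = if run < U then 1 else 0 := by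
  intro U
  induction U with
  | zero => simp
  | succ U ih =>
    rw [List.range_succ]
    simp only [List.map_append, List.sum_append, ih]
    by_cases h : run < U <;> by_cases h2 : U = run <;> simp [h, h2] <;> omega

theorem partitionN (i o : Int) (U : Nat) :
    ∀ (l : List (List Int)),
      (∀ b ∈ l, (checkA i b).1 = true → 0 ≤ (checkA i b).2 ∧ (checkA i b).2.toNat < U) →
      ((List.range U).map (fun (u : Nat) =>
          l.countP (fun b => decide (b.sum = o) && decide (checkA i b = (true, (u:Int)))))).sum
        = l.countP (fun b => decide (b.sum = o) && (checkA i b).1) := by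
  intro l
  induction l with
  | nil => intro _; simp
  | cons b t ih =>
    intro h
    have ht := ih (fun c hc => h c (List.mem_cons_of_mem _ hc))
    simp only [List.countP_cons]
    have hsplit : ((List.range U).map (fun (u : Nat) =>
        t.countP (fun b => decide (b.sum = o) && decide (checkA i b = (true, (u:Int))))
          + (if (decide (b.sum = o) && decide (checkA i b = (true, (u:Int)))) = true then 1 else 0))).sum
      = ((List.range U).map (fun (u : Nat) =>
          t.countP (fun b => decide (b.sum = o) && decide (checkA i b = (true, (u:Int)))))).sum
        + ((List.range U).map (fun (u : Nat) =>
          (if (decide (b.sum = o) && decide (checkA i b = (true, (u:Int)))) = true then 1 else 0))).sum := by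
      induction (List.range U) with
      | nil => simp
      | cons x xs ihx => simp [ihx]; ring
    rw [hsplit, ht]
    congr 1
    rcases hc : checkA i b with ⟨v, run⟩
    cases v
    · simp [hc]
    · by_cases ho : b.sum = o
      · have hr := h b List.mem_cons_self (by rw [hc])
        rw [hc] at hr
        simp only at hr
        obtain ⟨hr0, hrU⟩ := hr
        have hmap : (List.range U).map (fun (u : Nat) =>
            if (decide (b.sum = o) && decide ((((true : Bool), run) : Bool × Int) = (true, (u:Int)))) = true then (1:Nat) else 0)
            = (List.range U).map (fun (u : Nat) => if (u:Int) = ((run.toNat : Nat) : Int) then (1:Nat) else 0) := by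
          apply List.map_congr_left
          intro u _
          by_cases he : (u : Int) = ((run.toNat : Nat) : Int)
          · have h3 : (run : Int) = (u : Int) := by omega
            simp [ho, he, ← h3]
            omega
          · have h3 : (run : Int) ≠ (u : Int) := by omega
            simp [he, fun (h4 : run = (u:Int)) => h3 h4]
            omega
        rw [hmap, sum_range_indicator run.toNat U, if_pos hrU]
        simp [ho]
      · simp [ho]
theorem checkA_run_nonneg (i : Int) (b : List Int) : 0 ≤ (checkA i b).2 :=
  (checkA_run_bounds i b (true, 0) (by simp)).1

theorem cntN_succ_zero (i o : Int) (t : Nat) :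
    cntN i (t + 1) o 0 = (enum t).countP (fun b => decide (b.sum = o) && (checkA i b).1) := by
  simp only [cntN, enum, List.countP_append, List.countP_map]
  have h1 : (enum t).countP ((fun c => decide (c.sum = o) && decide (checkA i c = (true, 0))) ∘ (· ++ [0]))
      = (enum t).countP (fun b => decide (b.sum = o) && (checkA i b).1) := by
    apply List.countP_congr
    intro b _
    simp [checkA_append, checkStep, Prod.ext_iff]
  have h2 : (enum t).countP ((fun c => decide (c.sum = o) && decide (checkA i c = (true, 0))) ∘ (· ++ [1])) = 0 := by
    apply List.countP_eq_zero.mpr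
    intro b _
    have := checkA_run_nonneg i b
    simp [checkA_append, checkStep, Prod.ext_iff]
    intro _ h
    omega
  rw [h1, h2]
  omega

theorem cntN_succ_pos (i o u : Int) (t : Nat) (h0 : 0 ≤ u) (hui : u + 1 < i) :
    cntN i (t + 1) o (u + 1) = cntN i t (o - 1) u := by
  simp only [cntN, enum, List.countP_append, List.countP_map]
  have h1 : (enum t).countP ((fun c => decide (c.sum = o) && decide (checkA i c = (true, u + 1))) ∘ (· ++ [0])) = 0 := by
    apply List.countP_eq_zero.mpr
    intro b _
    simp [checkA_append, checkStep, Prod.ext_iff]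
    intro _ h
    omega
  have h2 : (enum t).countP ((fun c => decide (c.sum = o) && decide (checkA i c = (true, u + 1))) ∘ (· ++ [1]))
      = (enum t).countP (fun b => decide (b.sum = o - 1) && decide (checkA i b = (true, u))) := by
    apply List.countP_congr
    intro b _
    rcases hc : checkA i b with ⟨v, run⟩
    have hrn := checkA_run_nonneg i b
    rw [hc] at hrn; simp only at hrn
    by_cases hr : run = u
    · subst hr
      simp [checkA_append, checkStep, hc, Prod.ext_iff, if_neg (by omega : ¬ run + 1 ≥ i)]
      intro _
      omega
    · simp [checkA_append, checkStep, hc, Prod.ext_iff]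
      by_cases hv : v = true <;> simp [hv] <;> constructor <;> rintro ⟨-, h⟩ <;> first | omega | exact absurd h.2 hr | exact absurd h hr
  rw [h1, h2]
  simp

theorem cntN_succ_zero_row (i w : Int) (t : Nat) (hw : 1 ≤ w) :
    cntN i (t + 1) 0 w = 0 := by
  simp only [cntN, enum, List.countP_append, List.countP_map]
  have h1 : (enum t).countP ((fun c => decide (c.sum = (0:Int)) && decide (checkA i c = (true, w))) ∘ (· ++ [0])) = 0 := by
    apply List.countP_eq_zero.mpr
    intro b _
    simp [checkA_append, checkStep, Prod.ext_iff]
    intro _ h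
    omega
  have h2 : (enum t).countP ((fun c => decide (c.sum = (0:Int)) && decide (checkA i c = (true, w))) ∘ (· ++ [1])) = 0 := by
    apply List.countP_eq_zero.mpr
    intro b hb
    have := (enum_mem t b hb).2.2.1
    simp [checkA_append, checkStep, Prod.ext_iff]
    intro h
    omega
  rw [h1, h2]
def tblRow (i : Int) (U t : Nat) (o : Int) : List Int :=
  (List.range U).map (fun (u : Nat) => (cntN i t o (u:Int) : Int))

def tbl (i : Int) (kk U t : Nat) : List (List Int) :=
  (List.range (kk + 1)).map (fun (o : Nat) => tblRow i U t (o:Int))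

theorem fold_rows (U : Nat) (z : List Int) (g : Nat → List Int) :
    ∀ (n j : Nat) (acc : List (List Int)) (p : List Int),
      p = (if j = 0 then z else g (j - 1)) →
      (((List.range' j n).map g).foldl
        (fun (st : List (List Int) × List Int) row => (st.1 ++ [(row.sum :: st.2).take U], row)) (acc, p)).1
      = acc ++ (List.range' j n).map (fun o => ((g o).sum :: (if o = 0 then z else g (o - 1))).take U) := by
  intro n
  induction n with
  | zero => intro j acc p hp; simp
  | succ n ih =>
    intro j acc p hp
    rw [List.range'_succ]
    simp only [List.map_cons, List.foldl_cons]
    rw [ih (j + 1) _ (g j) (by simp)]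
    simp [hp]

theorem tblRow_step (i : Int) (U t : Nat) (on : Nat) (hU1 : 1 ≤ U)
    (hrun : ∀ b ∈ enum t, (checkA i b).1 = true → (checkA i b).2.toNat < U)
    (hcond : ∀ u : Nat, u + 1 < U → ((u:Int) + 1) < i) :
    ((tblRow i U t (on:Int)).sum ::
        (if on = 0 then List.replicate U (0:Int) else tblRow i U t ((on:Int) - 1))).take U
      = tblRow i U (t + 1) (on:Int) := by
  obtain ⟨V, rfl⟩ : ∃ V, U = V + 1 := ⟨U - 1, by omega⟩
  have hhead : (tblRow i (V+1) t (on:Int)).sum = (cntN i (t + 1) (on:Int) 0 : Int) := by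
    rw [tblRow, sum_map_natCast, cntN_succ_zero]
    congr 1
    simpa only [cntN] using partitionN i (on:Int) (V+1) (enum t)
      (fun b hb hv => ⟨checkA_run_nonneg i b, hrun b hb hv⟩)
  have htail : tblRow i (V+1) (t+1) (on:Int)
      = (cntN i (t + 1) (on:Int) 0 : Int) :: (List.range V).map (fun (u : Nat) => (cntN i (t+1) (on:Int) ((u:Int) + 1) : Int)) := by
    rw [tblRow, List.range_succ_eq_map]
    simp only [List.map_cons, List.map_map, Function.comp_def, Nat.cast_zero, Nat.cast_succ]
  rw [htail, hhead]
  simp only [List.take_succ_cons]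
  congr 1
  rcases on with _ | on'
  · simp only [Nat.cast_zero, reduceIte] at htail ⊢
    rw [List.take_replicate]
    have hmap0 : (List.range V).map (fun (u : Nat) => (cntN i (t+1) (0:Int) ((u:Int) + 1) : Nat) : Nat → Int)
        = (List.range V).map (fun _ => (0:Int)) := by
      apply List.map_congr_left
      intro u _
      rw [cntN_succ_zero_row i ((u:Int)+1) t (by omega)]
      simp
    rw [hmap0, List.map_const']
    simp [min_def]
  · simp only [if_neg (by omega : ¬ on' + 1 = 0)]
    rw [tblRow, ← List.map_take, List.take_range]
    have hmin : min V (V + 1) = V := by omega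
    rw [hmin]
    apply List.map_congr_left
    intro u hu
    have hu' : u + 1 < V + 1 := by simp at hu; omega
    rw [show ((on' + 1 : Nat) : Int) - 1 = ((on' : Nat) : Int) by push_cast; ring]
    rw [show ((on' + 1 : Nat) : Int) = ((on' : Nat) : Int) + 1 by push_cast; ring] 
    rw [cntN_succ_pos i _ (u:Int) t (by omega) (hcond u hu')]
    norm_num
theorem tbl_step (i : Int) (kk U t : Nat) (hU1 : 1 ≤ U)
    (hrun : ∀ b ∈ enum t, (checkA i b).1 = true → (checkA i b).2.toNat < U)
    (hcond : ∀ u : Nat, u + 1 < U → ((u:Int) + 1) < i) :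
    ((tbl i kk U t).foldl
        (fun (st : List (List Int) × List Int) row => (st.1 ++ [(row.sum :: st.2).take U], row))
        ([], List.replicate U (0:Int))).1 = tbl i kk U (t + 1) := by
  rw [tbl, List.range_eq_range',
    fold_rows U (List.replicate U 0) (fun on => tblRow i U t (on:Int)) (kk+1) 0 [] _ (by simp)]
  rw [tbl, List.range_eq_range']
  simp only [List.nil_append]
  apply List.map_congr_left
  intro on hon
  have := tblRow_step i U t on hU1 hrun hcond
  rcases on with _ | on'
  · simpa using this
  · have hcast : ((on' + 1 : Nat) : Int) - 1 = ((on' + 1 - 1 : Nat) : Int) := by push_cast; ring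
    rw [← this, if_neg (by omega : ¬ on' + 1 = 0), if_neg (by omega : ¬ on' + 1 = 0), hcast]

theorem foldl_const_range {α : Type} (F : α → α) (g : Nat → α) :
    ∀ n, (∀ t, t < n → F (g t) = g (t + 1)) →
      (List.range n).foldl (fun x _ => F x) (g 0) = g n := by
  intro n
  induction n with
  | zero => simp
  | succ n ih =>
    intro h
    rw [List.range_succ, List.foldl_append]
    rw [ih (fun t ht => h t (by omega))]
    simpa using h n (by omega)

theorem cntN_zero (i o u : Int) :
    cntN i 0 o u = (if o = 0 ∧ u = 0 then 1 else 0) := by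
  simp only [cntN, enum, List.countP_cons, List.countP_nil, checkA, List.foldl_nil,
    List.sum_nil, Prod.ext_iff]
  by_cases ho : o = 0 <;> by_cases hu : u = 0 <;>
    simp [ho, hu, eq_comm]

theorem tbl_zero (i : Int) (kk U : Nat) (hU1 : 1 ≤ U) :
    tbl i kk U 0
      = ((1:Int) :: (List.replicate U (0:Int)).drop 1) :: List.replicate kk (List.replicate U (0:Int)) := by
  obtain ⟨V, rfl⟩ : ∃ V, U = V + 1 := ⟨U - 1, by omega⟩
  rw [tbl, List.range_succ_eq_map]
  simp only [List.map_cons, List.map_map]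
  congr 1
  · rw [tblRow, List.range_succ_eq_map]
    simp only [List.map_cons, List.map_map, Function.comp_def, Nat.cast_zero, Nat.cast_succ]
    rw [List.replicate_succ, List.drop_succ_cons, List.drop_zero]
    congr 1
    · have : (List.range V).map (fun (u : Nat) => ((cntN i 0 0 ((u:Int)+1) : Nat) : Int))
          = (List.range V).map (fun _ => (0:Int)) := by
        apply List.map_congr_left
        intro u _
        rw [cntN_zero]
        simp
      rw [this, List.map_const']
      simp
  · have : (List.range kk).map (fun (on : Nat) => tblRow i (V+1) 0 ((on+1 : Nat) : Int))
        = (List.range kk).map (fun _ => List.replicate (V+1) (0:Int)) := by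
      apply List.map_congr_left
      intro on _
      rw [tblRow]
      have : (List.range (V+1)).map (fun (u : Nat) => ((cntN i 0 ((on+1:Nat):Int) (u:Int) : Nat) : Int))
          = (List.range (V+1)).map (fun _ => (0:Int)) := by
        apply List.map_congr_left
        intro u _
        rw [cntN_zero]
        simp
      rw [this, List.map_const']
      simp
    simp only [Function.comp_def, Nat.succ_eq_add_one]
    rw [this, List.map_const']
    simp
theorem compute_n_alt_eq (r k i : Int) (hk0 : 0 ≤ k) (hkr : k ≤ (if r > 0 then r else 0)) :
    compute_n_alt r k i
      = ((enum r.toNat).countP (fun b => decide (b.sum = k) && (checkA i b).1) : Int) := by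
  simp only [compute_n_alt]
  set rr := if r > 0 then r else 0 with hrr
  set U := (if (if i < rr + 1 then i else rr + 1) < 1 then 1 else if i < rr + 1 then i else rr + 1) with hU
  have hrr0 : 0 ≤ rr := by rw [hrr]; split <;> omega
  have hUor : (U = 1 ∧ i ≤ 1) ∨ (U = i ∧ 1 ≤ i ∧ i < rr + 1) ∨ (U = rr + 1 ∧ rr + 1 ≤ i) := by
    rw [hU]; split_ifs <;> omega
  have hU1 : 1 ≤ U := by rcases hUor with ⟨h1, _⟩ | ⟨h1, h2, _⟩ | ⟨h1, h2⟩ <;> omega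
  have hU1' : 1 ≤ U.toNat := by omega
  have hUNI : ((U.toNat : Nat) : Int) = U := by omega
  have hm : rr.toNat = r.toNat := by rw [hrr]; split <;> omega
  have hmI : ((r.toNat : Nat) : Int) = rr := by rw [hrr]; split <;> omega
  have hkI : ((k.toNat : Nat) : Int) = k := by omega
  -- generic run bound for strings of length t ≤ r.toNat
  have hrun : ∀ t : Nat, (t : Int) ≤ rr → ∀ b ∈ enum t, (checkA i b).1 = true →
      (checkA i b).2.toNat < U.toNat := by
    intro t ht b hb hv
    have hlen := (enum_mem t b hb).1
    have hb1 := checkA_run_nonneg i b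
    have hb2 := (checkA_run_bounds i b (true, 0) (by simp)).2
    rw [hlen] at hb2
    simp only [checkA] at hb1 hb2 hv ⊢
    have hvr := checkA_valid_run i b (true, 0) (by simp) hv
    rcases hvr with hvr | hvr <;>
      rcases hUor with ⟨h1, h2⟩ | ⟨h1, h2, h3⟩ | ⟨h1, h2⟩ <;> omega
  have hcond : ∀ u : Nat, u + 1 < U.toNat → ((u:Int) + 1) < i := by
    intro u hu
    rcases hUor with ⟨h1, h2⟩ | ⟨h1, h2, h3⟩ | ⟨h1, h2⟩ <;> omega
  rw [if_neg (by simp only [Bool.or_eq_true, decide_eq_true_eq, not_or]; constructor <;> omega)]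
  have hdp0 : ((1:Int) :: List.drop 1 (List.replicate U.toNat (0:Int))) ::
      List.replicate k.toNat (List.replicate U.toNat (0:Int)) = tbl i k.toNat U.toNat 0 :=
    (tbl_zero i k.toNat U.toNat hU1').symm
  rw [hdp0]
  have hfold : List.foldl
      (fun dp (_ : Nat) =>
        (List.foldl (fun (st : List (List Int) × List Int) row =>
            (st.1 ++ [List.take U.toNat (row.sum :: st.2)], row))
          ([], List.replicate U.toNat 0) dp).1)
      (tbl i k.toNat U.toNat 0) (List.range rr.toNat) = tbl i k.toNat U.toNat rr.toNat := by
    refine foldl_const_range _ (tbl i k.toNat U.toNat) rr.toNat ?_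
    intro t ht
    refine tbl_step i k.toNat U.toNat t hU1' ?_ hcond
    exact hrun t (by omega)
  rw [hfold, hm]
  have hlast : PySem.List.pyGet? (tbl i k.toNat U.toNat r.toNat) (-1)
      = some (tblRow i U.toNat r.toNat ((k.toNat : Nat) : Int)) := by
    rw [PySem.List.pyGet?_neg_one, tbl, List.range_succ, List.map_append]
    simp
  rw [hlast]
  simp only [Option.getD_some]
  rw [tblRow, sum_map_natCast]
  simp only [cntN]
  rw [partitionN i ((k.toNat : Nat) : Int) U.toNat (enum r.toNat)
    (fun b hb hv => ⟨checkA_run_nonneg i b, hrun r.toNat (by omega) b hb hv⟩)]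
  rw [hkI]
theorem compute_n_spec_aux : ∀ (r k i : Int), compute_n r k i = compute_n_alt r k i := by
  intro r k i
  rw [compute_n_eq_countP]
  have hpred : (enum r.toNat).countP (fun b => b.sum == k && (checkA i b).1)
      = (enum r.toNat).countP (fun b => decide (b.sum = k) && (checkA i b).1) := by
    apply List.countP_congr
    intro b _
    simp
  rw [hpred]
  by_cases hk : 0 ≤ k ∧ k ≤ (if r > 0 then r else 0)
  · rw [compute_n_alt_eq r k i hk.1 hk.2]
  · have hmI : ((r.toNat : Nat) : Int) = (if r > 0 then r else 0) := by split <;> omega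
    have hzero : (enum r.toNat).countP (fun b => decide (b.sum = k) && (checkA i b).1) = 0 := by
      apply List.countP_eq_zero.mpr
      intro b hb
      obtain ⟨-, -, hs1, hs2⟩ := enum_mem r.toNat b hb
      rw [hmI] at hs2
      simp only [Bool.and_eq_true, decide_eq_true_eq, not_and]
      intro hsum
      omega
    rw [hzero]
    simp only [compute_n_alt]
    rw [if_pos (by simp only [Bool.or_eq_true, decide_eq_true_eq]; omega)]
    simp

-- ===== VERDICT (by name: the statement is the Claim_ definition above) =====
theorem compute_n_spec : Claim_equal_compute_n := by
  unfold Claim_equal_compute_n Spec_compute_n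
  intro r k i _
  exact compute_n_spec_aux r k i
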